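-- pv_equiv track=rewrite | github.com/MiSild/AoC_2019 | Day_4/day4.py | has_adjacent_only_pair
-- ===== SOURCE A (Python) =====
-- def has_adjacent_only_pair(number):
--     first = True
--     for i in number:
--         if first:
--             current_digit = i
--             first = False
--             count = 0
--             continue
--         if i == current_digit:
--             count += 1
--         else:
--             if count == 1:
--                 return True
--             current_digit = i
--             count = 0
--     if count == 1:
--         return True
--     return False
-- ===== SOURCE B (Python) =====
-- def has_adjacent_only_pair(number):
--     # Scan maximal runs of equal adjacent characters; succeed iff some run has length exactly 2.
--     s = number
--     while s:
--         run = 1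
--         while run < len(s) and s[run] == s[0]:
--             run += 1
--         if run == 2:
--             return True
--         s = s[run:]
--     return False
-- ===== Notes on version B (the rewrite author's own statement) =====
-- stated objective: simpler
-- what changed: B scans maximal runs of equal characters (inner while measuring each run length, then skipping past it) and checks for a run of length exactly 2, instead of A's first/current_digit/count state machine with early returns.
import Mathlib
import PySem

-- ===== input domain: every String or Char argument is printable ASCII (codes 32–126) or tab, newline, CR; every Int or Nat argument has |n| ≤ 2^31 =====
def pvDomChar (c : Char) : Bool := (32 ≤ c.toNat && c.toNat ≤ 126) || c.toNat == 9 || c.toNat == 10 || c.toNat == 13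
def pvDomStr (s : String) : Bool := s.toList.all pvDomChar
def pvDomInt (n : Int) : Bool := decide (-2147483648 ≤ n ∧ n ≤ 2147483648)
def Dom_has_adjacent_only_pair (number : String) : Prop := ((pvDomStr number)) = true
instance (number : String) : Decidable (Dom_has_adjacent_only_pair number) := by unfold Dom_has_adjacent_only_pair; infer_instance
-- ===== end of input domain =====

-- B replaces A's first/current_digit/count state machine by a scan over maximal runs of
-- equal characters, checking for a run of length exactly 2 (objective: simpler).

-- ===== PORT A =====
-- A's for-loop over the characters: state is (current_digit, count); the 'first' iteration
-- is peeled off as the match on the head (first=True branch binds current_digit and count=0).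
def pvLoopA : List Char → Char → Nat → Bool
  | [], _, count => count == 1
  | i :: rest, current_digit, count =>
    if i == current_digit then pvLoopA rest current_digit (count + 1)
    else if count == 1 then true
    else pvLoopA rest i 0

-- on "" Python A raises UnboundLocalError ('count' never bound); excluded by Pre_; 'false' here is arbitrary
def has_adjacent_only_pair (number : String) : Bool :=
  match number.toList with
  | [] => false
  | c :: rest => pvLoopA rest c 0

-- ===== PORT B =====
-- Source B's outer while over s: run = 1 + length of the inner while's scan (chars equal to s[0]);
-- s = s[run:] is the dropWhile past that run. The fuel parameter (initialised to the length)
-- only makes the same computation total; it never runs out since each step drops ≥ 1 char.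
def pvLoopB : Nat → List Char → Bool
  | _, [] => false
  | 0, _ :: _ => false
  | fuel + 1, c :: rest =>
    if (rest.takeWhile (· == c)).length + 1 == 2 then true
    else pvLoopB fuel (rest.dropWhile (· == c))

def has_adjacent_only_pair_alt (number : String) : Bool :=
  pvLoopB number.toList.length number.toList

-- ===== PRECONDITION & SPEC =====
-- Pre_ excludes only the empty string, on which A raises UnboundLocalError.
def Pre_has_adjacent_only_pair (number : String) : Prop := number ≠ ""
instance (number : String) : Decidable (Pre_has_adjacent_only_pair number) := by unfold Pre_has_adjacent_only_pair; infer_instance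
def pvWitness_has_adjacent_only_pair : String := "112"

def Spec_has_adjacent_only_pair (number : String) (out : Bool) : Prop := out = has_adjacent_only_pair_alt number
instance (number : String) (out : Bool) : Decidable (Spec_has_adjacent_only_pair number out) := by unfold Spec_has_adjacent_only_pair; infer_instance

-- ===== CLAIM (what is proved, stated in full; the proofs are below) =====
def Claim_equal_has_adjacent_only_pair : Prop := ∀ (number : String), Dom_has_adjacent_only_pair number → Pre_has_adjacent_only_pair number → Spec_has_adjacent_only_pair number (has_adjacent_only_pair number)

-- ===== LEMMAS AND PROOFS =====
-- Invariant: A's state machine at state (current_digit, count) with l remaining equals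
-- "current run (count+1 so far, plus matching prefix of l) has total length 2, or B on the rest".
theorem pvLoopA_eq (l : List Char) : ∀ (c : Char) (k fuel : Nat), l.length ≤ fuel →
    pvLoopA l c k = ((k + 1 + (l.takeWhile (· == c)).length == 2) || pvLoopB fuel (l.dropWhile (· == c))) := by
  induction l with
  | nil =>
    intro c k fuel _
    have hb : pvLoopB fuel ([] : List Char) = false := by cases fuel <;> rfl
    simp only [pvLoopA, List.takeWhile_nil, List.dropWhile_nil, List.length_nil, Nat.add_zero,
      hb, Bool.or_false]
    rw [Bool.eq_iff_iff]; simp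
  | cons i rest ih =>
    intro c k fuel hfuel
    by_cases h : i = c
    · subst h
      simp only [pvLoopA, List.takeWhile_cons, List.dropWhile_cons, beq_self_eq_true, if_true,
        List.length_cons]
      rw [ih i (k + 1) fuel (by simp at hfuel; omega)]
      congr 1
      rw [Bool.eq_iff_iff]; simp; omega
    · have hne : (i == c) = false := by simp [h]
      obtain ⟨fuel', rfl⟩ : ∃ f, fuel = f + 1 := by
        cases fuel
        · simp at hfuel
        · exact ⟨_, rfl⟩
      simp only [pvLoopA, pvLoopB, List.takeWhile_cons, List.dropWhile_cons, hne,
        Bool.false_eq_true, if_false, List.length_nil, Nat.add_zero]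
      rw [ih i 0 fuel' (by simp at hfuel; omega)]
      by_cases hk : k = 1
      · subst hk; simp
      · have hk1 : (k == 1) = false := by simp [hk]
        have h2 : (k + 1 == 2) = false := by rw [Bool.eq_false_iff]; simp; omega
        simp only [hk1, Bool.false_eq_true, if_false, h2, Bool.false_or, Nat.zero_add]
        by_cases h3 : (rest.takeWhile (· == i)).length + 1 = 2
        · have e1 : (1 + (rest.takeWhile (· == i)).length == 2) = true := by simp; omega
          have e2 : ((rest.takeWhile (· == i)).length + 1 == 2) = true := by simp; omega
          simp [e1, e2]
        · have e1 : (1 + (rest.takeWhile (· == i)).length == 2) = false := by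
            rw [Bool.eq_false_iff]; simp; omega
          have e2 : ((rest.takeWhile (· == i)).length + 1 == 2) = false := by
            rw [Bool.eq_false_iff]; simp; omega
          simp [e1, e2]

-- ===== VERDICT (by name: the statement is the Claim_ definition above) =====
theorem has_adjacent_only_pair_spec : Claim_equal_has_adjacent_only_pair := by
  intro number _ hpre
  unfold Spec_has_adjacent_only_pair has_adjacent_only_pair has_adjacent_only_pair_alt
  cases hl : number.toList with
  | nil =>
    exact absurd (String.ext (by simp [hl])) hpre
  | cons c rest =>
    show pvLoopA rest c 0 = pvLoopB (c :: rest).length (c :: rest)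
    simp only [List.length_cons, pvLoopB]
    rw [pvLoopA_eq rest c 0 rest.length (le_refl _)]
    by_cases h : (rest.takeWhile (· == c)).length + 1 = 2
    · have : (0 + 1 + (rest.takeWhile (· == c)).length == 2) = true := by simp; omega
      simp [h, this]
    · have h1 : ((rest.takeWhile (· == c)).length + 1 == 2) = false := by simp; omega
      have h2 : (0 + 1 + (rest.takeWhile (· == c)).length == 2) = false := by simp; omega
      simp [h1, h2]
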